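-- pv_equiv track=rewrite | github.com/bc36/leetcode | lc_Python/lc2100_2199.py | kIncreasing
-- ===== SOURCE A (Python) =====
-- import bisect, collections, functools, math, itertools, heapq
-- from typing import List, Optional
--
-- def kIncreasing(arr: List[int], k: int) -> int:
--     group = collections.defaultdict(list)
--     for i, v in enumerate(arr):
--         group[i % k].append(v)
--     ans = 0
--     # LIS: longest increasing subsequence, lc300
--     for g in group.values():
--         a = []
--         for v in g:
--             pos = bisect.bisect_right(a, v)
--             if pos == len(a):
--                 a.append(v)
--             else:
--                 a[pos] = v
--         ans += len(g) - len(a)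
--     return ans
-- ===== SOURCE B (Python) =====
-- def kIncreasing(arr, k):
--     # Quadratic DP instead of patience sorting: dp of each element = 1 + the best dp
--     # of an earlier element of its interleaved group (index i % k) that is <= it;
--     # the answer is len(arr) minus the sum of the per-group maximum dp values.
--     seen = {}
--     for i, v in enumerate(arr):
--         prev = seen.setdefault(i % k, [])
--         d = 1
--         for u, du in prev:
--             if u <= v and du + 1 > d:
--                 d = du + 1
--         prev.append((v, d))
--     return len(arr) - sum(max(du for _, du in g) for g in seen.values())
-- ===== Notes on version B (the rewrite author's own statement) =====
-- stated objective: alternative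
-- what changed: B abandons A's patience-sorting LNDS (bisect_right tails arrays per group) for the classic quadratic DP: each element's dp value is 1 + the best dp of an earlier <=-element of its i%k group, computed in one pass with a dict of (value, dp) histories, and the answer is len(arr) minus the sum of per-group dp maxima.
import Mathlib
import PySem

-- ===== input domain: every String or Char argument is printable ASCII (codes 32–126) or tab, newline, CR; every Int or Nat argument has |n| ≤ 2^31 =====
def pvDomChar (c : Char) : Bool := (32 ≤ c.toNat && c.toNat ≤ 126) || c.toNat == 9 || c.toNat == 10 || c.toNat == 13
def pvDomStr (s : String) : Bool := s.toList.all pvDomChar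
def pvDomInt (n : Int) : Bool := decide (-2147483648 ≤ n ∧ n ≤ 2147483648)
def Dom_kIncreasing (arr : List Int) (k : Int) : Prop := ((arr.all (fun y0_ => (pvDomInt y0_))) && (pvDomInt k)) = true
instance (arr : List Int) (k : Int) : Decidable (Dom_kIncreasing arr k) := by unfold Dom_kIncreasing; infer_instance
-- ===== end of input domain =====

-- B replaces A's patience-sorting LNDS (bisect_right tails per i%k group) by the classic
-- quadratic DP (dp = 1 + best dp of an earlier <= element of the group); same result, a
-- genuinely different algorithm of similar size ('alternative').


-- ===== PORT A =====
-- A's inner four lines: bisect_right pile update on the tails array a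
def pvStep (a : List Int) (v : Int) : List Int :=
  let pos := PySem.List.bisectRight a v
  if pos = a.length then a ++ [v] else a.set pos v

def kIncreasing (arr : List Int) (k : Int) : Int :=
  let group : PySem.Dict Int (List Int) :=
    (PySem.List.enumerate arr 0).foldl
      (fun d iv => d.insert (PySem.Int.mod iv.1 k) (d.getD (PySem.Int.mod iv.1 k) [] ++ [iv.2]))
      PySem.Dict.empty
  group.values.foldl
    (fun ans g => ans + ((g.length : Int) - ((g.foldl pvStep []).length : Int))) 0

-- ===== PORT B =====
-- B's inner loop: d = 1; for (u, du) in prev: if u <= v and du + 1 > d: d = du + 1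
def pvDpStep (prev : List (Int × Int)) (v : Int) : Int :=
  prev.foldl (fun d p => if p.1 ≤ v ∧ p.2 + 1 > d then p.2 + 1 else d) 1

-- max(du for _, du in g): Python max of a generator; groups stored in seen are nonempty,
-- so the .getD 0 default is never taken on B's actual data
def pvGroupMax (g : List (Int × Int)) : Int :=
  (PySem.List.max? (g.map Prod.snd) (fun x => x)).getD 0

def kIncreasing_alt (arr : List Int) (k : Int) : Int :=
  let seen : PySem.Dict Int (List (Int × Int)) :=
    (PySem.List.enumerate arr 0).foldl
      (fun d iv =>
        let r := PySem.Int.mod iv.1 k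
        let prev := d.getD r []
        d.insert r (prev ++ [(iv.2, pvDpStep prev iv.2)]))
      PySem.Dict.empty
  (arr.length : Int) - (seen.values.map pvGroupMax).sum

-- ===== PRECONDITION & SPEC =====
-- Pre_ excludes only k = 0 with a nonempty arr, where the Python A (and B) raise ZeroDivisionError on i % k.
def Pre_kIncreasing (arr : List Int) (k : Int) : Prop := arr = [] ∨ k ≠ 0
instance (arr : List Int) (k : Int) : Decidable (Pre_kIncreasing arr k) := by unfold Pre_kIncreasing; infer_instance
def pvWitness_kIncreasing : List Int × Int := ([5, 4, 3, 2, 1], 2)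
def Spec_kIncreasing (arr : List Int) (k : Int) (out : Int) : Prop := out = kIncreasing_alt arr k
instance (arr : List Int) (k : Int) (out : Int) : Decidable (Spec_kIncreasing arr k out) := by unfold Spec_kIncreasing; infer_instance

-- ===== CLAIM (what is proved, stated in full; the proofs are below) =====
def Claim_equal_kIncreasing : Prop := ∀ (arr : List Int) (k : Int), Dom_kIncreasing arr k → Pre_kIncreasing arr k → Spec_kIncreasing arr k (kIncreasing arr k)

-- ===== LEMMAS AND PROOFS =====

-- B's per-group history: each value of a group annotated with its dp value
def pvAnnot (g : List Int) : List (Int × Int) :=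
  g.foldl (fun l v => l ++ [(v, pvDpStep l v)]) []

def pvPf (p : Int × List Int) : Int × List (Int × Int) := (p.1, pvAnnot p.2)

theorem pvAnnot_append_singleton (g : List Int) (v : Int) :
    pvAnnot (g ++ [v]) = pvAnnot g ++ [(v, pvDpStep (pvAnnot g) v)] := by
  simp [pvAnnot]

-- get? on a value-mapped association list
theorem pv_get?_map {f : List Int → List (Int × Int)} (l : List (Int × List Int)) (r : Int) :
    (PySem.Dict.mk (l.map (fun p => (p.1, f p.2)))).get? r
      = ((PySem.Dict.mk l).get? r).map f := by
  induction l with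
  | nil => simp [PySem.Dict.get?]
  | cons p t ih =>
      rw [List.map_cons, PySem.Dict.get?_mk_cons, PySem.Dict.get?_mk_cons]
      by_cases h : p.1 == r
      · simp [h]
      · simp [h, ih]

theorem pv_getD_pf (dA : PySem.Dict Int (List Int)) (dB : PySem.Dict Int (List (Int × Int)))
    (h : dB.items = dA.items.map pvPf) (r : Int) :
    dB.getD r [] = pvAnnot (dA.getD r []) := by
  have hB : dB = PySem.Dict.mk (dA.items.map (fun p => (p.1, pvAnnot p.2))) := by
    apply PySem.Dict.ext; rw [h]; rfl
  have heta : PySem.Dict.mk dA.items = dA := rfl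
  rw [hB, PySem.Dict.getD_eq_get?_getD, PySem.Dict.getD_eq_get?_getD,
      pv_get?_map (f := pvAnnot) dA.items r, heta]
  cases dA.get? r <;> simp [pvAnnot]

theorem pv_keys_pf (dA : PySem.Dict Int (List Int)) (dB : PySem.Dict Int (List (Int × Int)))
    (h : dB.items = dA.items.map pvPf) : dB.keys = dA.keys := by
  simp only [PySem.Dict.keys, h, List.map_map]
  rfl

theorem pv_contains_pf (dA : PySem.Dict Int (List Int)) (dB : PySem.Dict Int (List (Int × Int)))
    (h : dB.items = dA.items.map pvPf) (r : Int) : dB.contains r = dA.contains r := by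
  rw [PySem.Dict.contains_eq_decide_mem_keys, PySem.Dict.contains_eq_decide_mem_keys,
      pv_keys_pf dA dB h]

-- one step preserves "B's dict is A's dict with every group annotated"
theorem pv_step_pf (k : Int) (dA : PySem.Dict Int (List Int)) (dB : PySem.Dict Int (List (Int × Int)))
    (h : dB.items = dA.items.map pvPf) (iv : Int × Int) :
    (dB.insert (PySem.Int.mod iv.1 k)
        (dB.getD (PySem.Int.mod iv.1 k) []
          ++ [(iv.2, pvDpStep (dB.getD (PySem.Int.mod iv.1 k) []) iv.2)])).items
      = (dA.insert (PySem.Int.mod iv.1 k)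
          (dA.getD (PySem.Int.mod iv.1 k) [] ++ [iv.2])).items.map pvPf := by
  set r := PySem.Int.mod iv.1 k with hr
  have hg : dB.getD r [] = pvAnnot (dA.getD r []) := pv_getD_pf dA dB h r
  have hc : dB.contains r = dA.contains r := pv_contains_pf dA dB h r
  have hv : dB.getD r [] ++ [(iv.2, pvDpStep (dB.getD r []) iv.2)]
      = pvAnnot (dA.getD r [] ++ [iv.2]) := by
    rw [hg, pvAnnot_append_singleton]
  by_cases hcon : dA.contains r
  · rw [PySem.Dict.items_insert_of_contains dB _ (by rw [hc]; exact hcon),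
        PySem.Dict.items_insert_of_contains dA _ hcon, h, List.map_map, List.map_map]
    apply List.map_congr_left
    intro p _
    by_cases hp : p.1 == r
    · simp [Function.comp, pvPf, hp, hv]
    · simp [Function.comp, pvPf, hp]
  · rw [PySem.Dict.items_insert_of_not_contains dB _ (by rw [hc]; simpa using hcon),
        PySem.Dict.items_insert_of_not_contains dA _ (by simpa using hcon), h, List.map_append]
    simp [pvPf, hv]

-- the whole loops stay related
theorem pv_fold_pf (k : Int) (l : List (Int × Int)) :
    ∀ (dA : PySem.Dict Int (List Int)) (dB : PySem.Dict Int (List (Int × Int))),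
    dB.items = dA.items.map pvPf →
    (l.foldl (fun d iv =>
        d.insert (PySem.Int.mod iv.1 k)
          (d.getD (PySem.Int.mod iv.1 k) []
            ++ [(iv.2, pvDpStep (d.getD (PySem.Int.mod iv.1 k) []) iv.2)])) dB).items
      = (l.foldl (fun d iv =>
          d.insert (PySem.Int.mod iv.1 k) (d.getD (PySem.Int.mod iv.1 k) [] ++ [iv.2])) dA).items.map pvPf := by
  induction l with
  | nil => intro dA dB h; simpa using h
  | cons iv t ih =>
      intro dA dB h
      exact ih _ _ (pv_step_pf k dA dB h iv)

-- replacing the value at one key of a Nodup key list shifts the sum by the difference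
theorem pv_sum_map_update (keys : List Int) (hnd : keys.Nodup) (r : Int) (hr : r ∈ keys)
    (f : Int → Int) (X : Int) :
    (keys.map (fun key => if key = r then X else f key)).sum
      = (keys.map f).sum - f r + X := by
  induction keys with
  | nil => cases hr
  | cons a t ih =>
      have hnd1 := (List.nodup_cons.mp hnd).1
      have hnd2 := (List.nodup_cons.mp hnd).2
      by_cases har : a = r
      · have hmap : t.map (fun key => if key = r then X else f key) = t.map f := by
          apply List.map_congr_left
          intro x hx
          have hxr : x ≠ r := by
            intro he; apply hnd1; rw [har, ← he]; exact hx
          simp [hxr]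
        simp [har, hmap]; ring
      · have hrt : r ∈ t := by
          rcases List.mem_cons.mp hr with h1 | h1
          · exact absurd h1.symm har
          · exact h1
        simp only [List.map_cons, List.sum_cons, har, if_false, ih hnd2 hrt]
        ring

def pvSumLen (d : PySem.Dict Int (List Int)) : Int :=
  (d.values.map (fun g => (g.length : Int))).sum

-- one defaultdict-append step adds exactly one to the total of the value lengths
theorem pv_sumLen_step (k : Int) (d : PySem.Dict Int (List Int)) (hnd : d.keys.Nodup) (iv : Int × Int) :
    pvSumLen (d.insert (PySem.Int.mod iv.1 k) (d.getD (PySem.Int.mod iv.1 k) [] ++ [iv.2]))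
      = pvSumLen d + 1 := by
  set r := PySem.Int.mod iv.1 k with hr
  have hvals : ∀ (d' : PySem.Dict Int (List Int)), d'.keys.Nodup →
      pvSumLen d' = (d'.keys.map (fun key => ((d'.getD key []).length : Int))).sum := by
    intro d' hh
    unfold pvSumLen
    rw [PySem.Dict.values_eq_map_keys d' hh ([] : List Int), List.map_map]
    rfl
  have hnd' : (d.insert r (d.getD r [] ++ [iv.2])).keys.Nodup :=
    PySem.Dict.nodup_keys_insert _ _ _ hnd
  rw [hvals _ hnd', hvals _ hnd]
  by_cases hc : d.contains r
  · rw [PySem.Dict.keys_insert_of_contains d _ hc]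
    have hrepl : (d.keys.map (fun key => (((d.insert r (d.getD r [] ++ [iv.2])).getD key []).length : Int)))
        = d.keys.map (fun key => if key = r then ((d.getD r []).length : Int) + 1 else ((d.getD key []).length : Int)) := by
      apply List.map_congr_left
      intro key _
      rw [PySem.Dict.getD_insert]
      by_cases hk : key = r <;> simp [hk]
    rw [hrepl, pv_sum_map_update d.keys hnd r ((PySem.Dict.contains_iff_mem_keys d r).mp hc) _ _]
    ring
  · rw [PySem.Dict.keys_insert_of_not_contains d _ (by simpa using hc), List.map_append]
    have h1 : (d.keys.map (fun key => (((d.insert r (d.getD r [] ++ [iv.2])).getD key []).length : Int)))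
        = d.keys.map (fun key => ((d.getD key []).length : Int)) := by
      apply List.map_congr_left
      intro key hk
      rw [PySem.Dict.getD_insert]
      have hne : key ≠ r := by
        rintro rfl
        exact hc ((PySem.Dict.contains_iff_mem_keys d r).mpr hk)
      simp [hne]
    have h2 : (d.getD r []) = [] := PySem.Dict.getD_of_not_contains _ _ (by simpa using hc)
    rw [h1]
    simp [PySem.Dict.getD_insert, h2]

theorem pv_sumLen_fold (k : Int) (l : List (Int × Int)) :
    ∀ (d : PySem.Dict Int (List Int)), d.keys.Nodup →
    pvSumLen (l.foldl (fun d iv =>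
        d.insert (PySem.Int.mod iv.1 k) (d.getD (PySem.Int.mod iv.1 k) [] ++ [iv.2])) d)
      = pvSumLen d + l.length := by
  induction l with
  | nil => intro d _; simp
  | cons iv t ih =>
      intro d hnd
      have h1 := ih _ (PySem.Dict.nodup_keys_insert d (PySem.Int.mod iv.1 k)
        (d.getD (PySem.Int.mod iv.1 k) [] ++ [iv.2]) hnd)
      simp only [List.foldl_cons, h1, pv_sumLen_step k d hnd iv, List.length_cons]
      push_cast
      ring

theorem pv_sum_map_sub (l : List (List Int)) (f h : List Int → Int) :
    (l.map (fun g => f g - h g)).sum = (l.map f).sum - (l.map h).sum := by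
  induction l with
  | nil => simp
  | cons a t ih => simp [ih]; ring

-- ===== the patience = DP core =====

-- invariant tying B's dp history L to A's tails array T:
-- T is sorted; T[i] is the minimum value among pairs of L with dp value i+1 (and is attained);
-- every dp value of L lies in [1, |T|]
def pvInv (L : List (Int × Int)) (T : List Int) : Prop :=
  T.Pairwise (· ≤ ·) ∧
  (∀ i (hi : i < T.length), (T[i], (i : Int) + 1) ∈ L ∧ ∀ p ∈ L, p.2 = (i : Int) + 1 → T[i] ≤ p.1) ∧
  (∀ p ∈ L, 1 ≤ p.2 ∧ p.2 ≤ (T.length : Int))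

-- running-max facts about B's inner loop
theorem pvDpStep_fold_facts (v : Int) (L : List (Int × Int)) : ∀ (a : Int),
    a ≤ L.foldl (fun d p => if p.1 ≤ v ∧ p.2 + 1 > d then p.2 + 1 else d) a ∧
    (∀ p ∈ L, p.1 ≤ v → p.2 + 1 ≤ L.foldl (fun d p => if p.1 ≤ v ∧ p.2 + 1 > d then p.2 + 1 else d) a) ∧
    (L.foldl (fun d p => if p.1 ≤ v ∧ p.2 + 1 > d then p.2 + 1 else d) a = a ∨
      ∃ p ∈ L, p.1 ≤ v ∧ L.foldl (fun d p => if p.1 ≤ v ∧ p.2 + 1 > d then p.2 + 1 else d) a = p.2 + 1) := by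
  induction L with
  | nil => intro a; refine ⟨le_refl a, by simp, Or.inl rfl⟩
  | cons q t ih =>
      intro a
      simp only [List.foldl_cons]
      by_cases h : q.1 ≤ v ∧ q.2 + 1 > a
      · rw [if_pos h]
        obtain ⟨h1, h2, h3⟩ := ih (q.2 + 1)
        refine ⟨by omega, ?_, ?_⟩
        · intro p hp hpv
          rcases List.mem_cons.mp hp with rfl | hmem
          · exact h1
          · exact h2 p hmem hpv
        · rcases h3 with h3 | ⟨p, hp, hpv, he⟩
          · exact Or.inr ⟨q, by simp, h.1, h3⟩
          · exact Or.inr ⟨p, List.mem_cons_of_mem q hp, hpv, he⟩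
      · rw [if_neg h]
        obtain ⟨h1, h2, h3⟩ := ih a
        refine ⟨h1, ?_, ?_⟩
        · intro p hp hpv
          rcases List.mem_cons.mp hp with rfl | hmem
          · have hle : p.2 + 1 ≤ a := by
              by_contra hc
              exact h ⟨hpv, by omega⟩
            omega
          · exact h2 p hmem hpv
        · rcases h3 with h3 | ⟨p, hp, hpv, he⟩
          · exact Or.inl h3
          · exact Or.inr ⟨p, List.mem_cons_of_mem q hp, hpv, he⟩

-- pvDpStep = bisect position + 1, given the invariant
theorem pvDpStep_eq_pos (L : List (Int × Int)) (T : List Int) (hI : pvInv L T) (v : Int) :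
    pvDpStep L v = (PySem.List.bisectRight T v : Int) + 1 := by
  obtain ⟨hsort, hmin, hrange⟩ := hI
  obtain ⟨hle, hlt, hgt⟩ := PySem.List.bisectRight_spec T v hsort
  set pos := PySem.List.bisectRight T v with hpos
  obtain ⟨h1, h2, h3⟩ := pvDpStep_fold_facts v L 1
  have hub : pvDpStep L v ≤ (pos : Int) + 1 := by
    unfold pvDpStep
    rcases h3 with h3 | ⟨p, hp, hpv, he⟩
    · rw [h3]; omega
    · rw [he]
      by_contra hcon
      push Not at hcon
      have hp1 : 1 ≤ p.2 := (hrange p hp).1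
      have hp2 : p.2 ≤ (T.length : Int) := (hrange p hp).2
      have hil : p.2.toNat - 1 < T.length := by omega
      have hip : pos ≤ p.2.toNat - 1 := by omega
      have := hgt (p.2.toNat - 1) hil hip
      have hTmin := (hmin (p.2.toNat - 1) hil).2 p hp (by omega)
      omega
  have hlb : (pos : Int) + 1 ≤ pvDpStep L v := by
    rcases Nat.eq_zero_or_pos pos with h0 | hposgt
    · unfold pvDpStep; rw [h0]; simpa using h1
    · have hi : pos - 1 < T.length := by omega
      have hTm : T[pos - 1] ≤ v := hlt (pos - 1) hi (by omega)
      obtain ⟨hmem, _⟩ := hmin (pos - 1) hi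
      have := h2 _ hmem hTm
      unfold pvDpStep
      omega
  omega

-- the invariant is preserved by one element
theorem pvInv_step (L : List (Int × Int)) (T : List Int) (hI : pvInv L T) (v : Int) :
    pvInv (L ++ [(v, pvDpStep L v)]) (pvStep T v) := by
  have hd : pvDpStep L v = (PySem.List.bisectRight T v : Int) + 1 := pvDpStep_eq_pos L T hI v
  unfold pvInv at hI ⊢
  obtain ⟨hsort, hmin, hrange⟩ := hI
  obtain ⟨hle, hlt, hgt⟩ := PySem.List.bisectRight_spec T v hsort
  have hstep : pvStep T v = if PySem.List.bisectRight T v = T.length then T ++ [v]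
      else T.set (PySem.List.bisectRight T v) v := rfl
  set pos := PySem.List.bisectRight T v with hposdef
  rw [hstep, hd]
  by_cases hcase : pos = T.length
  · -- v extends the tails array: every tail is ≤ v
    rw [if_pos hcase, hcase]
    refine ⟨?_, ?_, ?_⟩
    · refine List.pairwise_append.mpr ⟨hsort, List.pairwise_singleton _ _, ?_⟩
      intro a ha b hb
      simp only [List.mem_singleton] at hb
      subst hb
      obtain ⟨j, hj, rfl⟩ := List.mem_iff_getElem.mp ha
      exact hlt j hj (by omega)
    · intro i hi
      rw [List.length_append, List.length_singleton] at hi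
      by_cases hi' : i < T.length
      · refine ⟨?_, ?_⟩
        · rw [List.getElem_append_left hi']
          exact List.mem_append_left _ (hmin i hi').1
        · intro p hp hpd
          rw [List.getElem_append_left hi']
          rcases List.mem_append.mp hp with hpL | hpnew
          · exact (hmin i hi').2 p hpL hpd
          · simp only [List.mem_singleton] at hpnew
            subst hpnew
            have hpd' : (T.length : Int) + 1 = (i : Int) + 1 := hpd
            exfalso
            omega
      · have hieq : i = T.length := by omega
        subst hieq
        refine ⟨?_, ?_⟩
        · simp only [List.getElem_concat_length]
          exact List.mem_append_right _ (by simp)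
        · intro p hp hpd
          simp only [List.getElem_concat_length]
          rcases List.mem_append.mp hp with hpL | hpnew
          · exfalso
            have := (hrange p hpL).2
            omega
          · simp only [List.mem_singleton] at hpnew
            subst hpnew
            exact le_refl v
    · intro p hp
      rw [List.length_append, List.length_singleton]
      rcases List.mem_append.mp hp with hpL | hpnew
      · have := hrange p hpL
        push_cast
        omega
      · simp only [List.mem_singleton] at hpnew
        subst hpnew
        refine ⟨?_, ?_⟩
        · show (1 : Int) ≤ (T.length : Int) + 1
          omega
        · show (T.length : Int) + 1 ≤ ((T.length + 1 : Nat) : Int)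
          push_cast
          omega
  · -- v replaces the first tail greater than it
    rw [if_neg hcase]
    have hposlt : pos < T.length := lt_of_le_of_ne hle hcase
    have hvlt : v < T[pos] := hgt pos hposlt (le_refl pos)
    refine ⟨?_, ?_, ?_⟩
    · rw [List.pairwise_iff_getElem] at hsort ⊢
      intro i j hi hj hij
      rw [List.length_set] at hi hj
      rw [List.getElem_set, List.getElem_set]
      split_ifs with h1 h2 h2
      · omega
      · exact le_of_lt (hgt j hj (by omega))
      · exact hlt i hi (by omega)
      · exact hsort i j hi hj hij
    · intro i hi
      rw [List.length_set] at hi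
      by_cases hip : i = pos
      · subst hip
        refine ⟨?_, ?_⟩
        · rw [List.getElem_set, if_pos rfl]
          exact List.mem_append_right _ (by simp)
        · intro p hp hpd
          rw [List.getElem_set, if_pos rfl]
          rcases List.mem_append.mp hp with hpL | hpnew
          · have := (hmin pos hi).2 p hpL hpd
            omega
          · simp only [List.mem_singleton] at hpnew
            subst hpnew
            exact le_refl v
      · refine ⟨?_, ?_⟩
        · rw [List.getElem_set, if_neg (by omega)]
          exact List.mem_append_left _ (hmin i hi).1
        · intro p hp hpd
          rw [List.getElem_set, if_neg (by omega)]
          rcases List.mem_append.mp hp with hpL | hpnew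
          · exact (hmin i hi).2 p hpL hpd
          · simp only [List.mem_singleton] at hpnew
            subst hpnew
            have hpd' : (pos : Int) + 1 = (i : Int) + 1 := hpd
            exfalso
            omega
    · intro p hp
      rw [List.length_set]
      rcases List.mem_append.mp hp with hpL | hpnew
      · exact hrange p hpL
      · simp only [List.mem_singleton] at hpnew
        subst hpnew
        refine ⟨?_, ?_⟩
        · show (1 : Int) ≤ (pos : Int) + 1
          omega
        · show (pos : Int) + 1 ≤ (T.length : Int)
          omega

theorem pvInv_annot (g : List Int) : pvInv (pvAnnot g) (g.foldl pvStep []) := by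
  induction g using List.reverseRecOn with
  | nil =>
      unfold pvInv
      refine ⟨List.Pairwise.nil, ?_, ?_⟩
      · intro i hi
        simp at hi
      · intro p hp
        simp [pvAnnot] at hp
  | append_singleton g' v ih =>
      rw [pvAnnot_append_singleton]
      simp only [List.foldl_append, List.foldl_cons, List.foldl_nil]
      exact pvInv_step (pvAnnot g') (g'.foldl pvStep []) ih v

-- per-group: A's pile length = B's maximum dp value
theorem pv_pile_eq_max (g : List Int) :
    ((g.foldl pvStep []).length : Int) = pvGroupMax (pvAnnot g) := by
  obtain ⟨hsort, hmin, hrange⟩ := pvInv_annot g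
  unfold pvGroupMax
  cases hM : PySem.List.max? ((pvAnnot g).map Prod.snd) (fun x => x) with
  | none =>
      rw [PySem.List.max?_eq_none_iff] at hM
      have hLnil : pvAnnot g = [] := List.map_eq_nil_iff.mp hM
      have hT0 : (g.foldl pvStep []).length = 0 := by
        by_contra h0
        have := (hmin 0 (by omega)).1
        rw [hLnil] at this
        simp at this
      simp [hT0]
  | some M =>
      have hmemM : M ∈ (pvAnnot g).map Prod.snd := PySem.List.max?_mem hM
      obtain ⟨p, hp, hpsnd⟩ := List.mem_map.mp hmemM
      have hr := hrange p hp
      have hn : (g.foldl pvStep []).length ≠ 0 := by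
        intro h0
        rw [h0] at hr
        omega
      have hmem2 : ((((g.foldl pvStep []).length - 1 : Nat) : Int) + 1) ∈ (pvAnnot g).map Prod.snd :=
        List.mem_map.mpr ⟨_, (hmin ((g.foldl pvStep []).length - 1) (by omega)).1, rfl⟩
      have hlbs := PySem.List.max?_isMax hM _ hmem2
      simp only [Option.getD_some]
      omega

theorem pv_main (arr : List Int) (k : Int) : kIncreasing arr k = kIncreasing_alt arr k := by
  show (((PySem.List.enumerate arr 0).foldl
      (fun d iv => d.insert (PySem.Int.mod iv.1 k) (d.getD (PySem.Int.mod iv.1 k) [] ++ [iv.2]))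
      PySem.Dict.empty).values.foldl
        (fun ans g => ans + ((g.length : Int) - ((g.foldl pvStep []).length : Int))) 0)
    = (arr.length : Int) - (((PySem.List.enumerate arr 0).foldl
        (fun d iv =>
          d.insert (PySem.Int.mod iv.1 k)
            (d.getD (PySem.Int.mod iv.1 k) []
              ++ [(iv.2, pvDpStep (d.getD (PySem.Int.mod iv.1 k) []) iv.2)]))
        PySem.Dict.empty).values.map pvGroupMax).sum
  set l := PySem.List.enumerate arr 0 with hl
  set dA := l.foldl (fun d iv =>
      d.insert (PySem.Int.mod iv.1 k) (d.getD (PySem.Int.mod iv.1 k) [] ++ [iv.2]))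
      PySem.Dict.empty with hdA
  set dB := l.foldl (fun d iv =>
      d.insert (PySem.Int.mod iv.1 k)
        (d.getD (PySem.Int.mod iv.1 k) []
          ++ [(iv.2, pvDpStep (d.getD (PySem.Int.mod iv.1 k) []) iv.2)]))
      PySem.Dict.empty with hdB
  have hrel : dB.items = dA.items.map pvPf := by
    rw [hdA, hdB]
    exact pv_fold_pf k l PySem.Dict.empty PySem.Dict.empty (by rfl)
  have hsum : pvSumLen dA = (l.length : Int) := by
    rw [hdA]
    have h0 := pv_sumLen_fold k l PySem.Dict.empty (by simp [pysem])
    rw [h0]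
    simp [pvSumLen, PySem.Dict.empty, PySem.Dict.values]
  have hlen : l.length = arr.length := by rw [hl]; exact PySem.List.length_enumerate arr 0
  rw [PySem.List.foldl_add dA.values
    (fun g : List Int => (g.length : Int) - ((g.foldl pvStep []).length : Int)) 0]
  have hA : (dA.values.map (fun g => (g.length : Int) - ((g.foldl pvStep []).length : Int))).sum
      = (dA.values.map (fun g => (g.length : Int))).sum
        - (dA.values.map (fun g => ((g.foldl pvStep []).length : Int))).sum := by
    exact pv_sum_map_sub dA.values (fun g => (g.length : Int)) (fun g => ((g.foldl pvStep []).length : Int))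
  have hB : dB.values = dA.values.map pvAnnot := by
    simp only [PySem.Dict.values, hrel, List.map_map]
    rfl
  have hsumA : (dA.values.map (fun g => (g.length : Int))).sum = (arr.length : Int) := by
    have : pvSumLen dA = (dA.values.map (fun g => (g.length : Int))).sum := rfl
    rw [← this, hsum, hlen]
  rw [hA, hB, List.map_map, hsumA]
  have hmm : (dA.values.map (pvGroupMax ∘ pvAnnot))
      = dA.values.map (fun g => ((g.foldl pvStep []).length : Int)) := by
    apply List.map_congr_left
    intro g _
    exact (pv_pile_eq_max g).symm
  rw [hmm]
  ring

-- ===== VERDICT (by name: the statement is the Claim_ definition above) =====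
theorem kIncreasing_spec : Claim_equal_kIncreasing := by
  intro arr k _ _
  exact pv_main arr k
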